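-- pv_equiv track=rewrite | github.com/mwisnowski/mtg_python_deckbuilder | builder_utils.py | distribute_remaining_basics
-- ===== SOURCE A (Python) =====
-- from typing import Dict, List, Tuple, Optional, Any, Callable, TypeVar, Union, cast
--
-- def distribute_remaining_basics(
--     basics_per_color: Dict[str, int],
--     remaining_basics: int,
--     colors: List[str]
-- ) -> Dict[str, int]:
--     """Distribute remaining basic lands across colors.
--
--     This function takes the initial distribution of basic lands and distributes
--     any remaining basics across the colors. The distribution prioritizes colors
--     based on their position in the color list (typically WUBRG order).
--
--     Args:
--         basics_per_color: Initial distribution of basics per color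
--         remaining_basics: Number of remaining basics to distribute
--         colors: List of colors to distribute basics across
--
--     Returns:
--         Updated dictionary with final basic land counts per color
--
--     Example:
--         >>> distribute_remaining_basics(
--         ...     {'W': 6, 'U': 6, 'B': 6},
--         ...     2,
--         ...     ['W', 'U', 'B']
--         ... )
--         {'W': 7, 'U': 7, 'B': 6}
--     """
--     if not colors:
--         return basics_per_color
--
--     # Create a copy to avoid modifying the input dictionary
--     final_distribution = basics_per_color.copy()
--
--     # Distribute remaining basics
--     color_index = 0
--     while remaining_basics > 0 and color_index < len(colors):
--         color = colors[color_index]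
--         if color in final_distribution:
--             final_distribution[color] += 1
--             remaining_basics -= 1
--         color_index = (color_index + 1) % len(colors)
--
--     return final_distribution
-- ===== SOURCE B (Python) =====
-- def distribute_remaining_basics(basics_per_color, remaining_basics, colors):
--     if not colors:
--         return basics_per_color
--     final_distribution = dict(basics_per_color)
--     if remaining_basics <= 0:
--         return final_distribution
--     valid = [c for c in colors if c in final_distribution]
--     m = len(valid)
--     if m == 0:
--         return final_distribution
--     q, r = divmod(remaining_basics, m)
--     for c in valid[:r]:
--         final_distribution[c] += q + 1
--     for c in valid[r:]:
--         final_distribution[c] += q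
--     return final_distribution
-- ===== Notes on version B (the rewrite author's own statement) =====
-- stated objective: alternative
-- what changed: A hands out the remaining basics one at a time in a round-robin while loop over the colors; B computes the same distribution in closed form with one divmod: every color occurrence that is a key gets remaining//m and the first remaining%m of them get one extra.
-- outside the precondition, e.g. on distribute_remaining_basics({'W': 3}, 2, ['U']): A does not finish within the time limit, B returns {'W': 3}
import Mathlib
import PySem

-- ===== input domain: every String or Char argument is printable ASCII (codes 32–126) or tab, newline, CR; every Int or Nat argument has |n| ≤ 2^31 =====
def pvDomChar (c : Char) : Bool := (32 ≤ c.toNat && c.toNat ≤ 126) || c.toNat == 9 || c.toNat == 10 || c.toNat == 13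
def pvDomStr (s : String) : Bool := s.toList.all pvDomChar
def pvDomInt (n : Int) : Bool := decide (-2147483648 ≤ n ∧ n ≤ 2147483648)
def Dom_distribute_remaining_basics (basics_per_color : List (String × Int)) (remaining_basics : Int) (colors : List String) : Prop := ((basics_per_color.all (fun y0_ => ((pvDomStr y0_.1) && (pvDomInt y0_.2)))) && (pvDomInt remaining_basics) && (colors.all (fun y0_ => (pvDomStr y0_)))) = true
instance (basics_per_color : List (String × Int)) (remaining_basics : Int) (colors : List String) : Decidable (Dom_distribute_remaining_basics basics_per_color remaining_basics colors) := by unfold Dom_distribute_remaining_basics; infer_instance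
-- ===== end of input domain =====

-- B replaces A's one-increment-at-a-time round-robin while loop (remaining_basics iterations) by a
-- single divmod split: each valid colors entry gets remaining//m, the first remaining%m get one more.

-- ===== PORT A =====
-- A's while loop. The fuel argument only makes the recursion total in Lean: on every input admitted
-- by Pre_ the loop exits before the fuel runs out, so the port computes exactly what A computes.
def pvALoop (fuel : Nat) (d : PySem.Dict String Int) (remaining : Int) (i : Nat) (colors : List String) : PySem.Dict String Int :=
  match fuel with
  | 0 => d
  | fuel + 1 =>
    if 0 < remaining ∧ i < colors.length then
      let color := colors.getD i ""
      if d.contains color then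
        pvALoop fuel (d.modify color 0 (· + 1)) (remaining - 1) ((i + 1) % colors.length) colors
      else
        pvALoop fuel d remaining ((i + 1) % colors.length) colors
    else d

def distribute_remaining_basics (basics_per_color : List (String × Int)) (remaining_basics : Int) (colors : List String) : List (String × Int) :=
  if colors = [] then basics_per_color
  else
    let final_distribution := PySem.Dict.mk basics_per_color
    (pvALoop (remaining_basics.toNat * colors.length + colors.length + 1) final_distribution remaining_basics 0 colors).items

-- ===== PORT B =====
def distribute_remaining_basics_alt (basics_per_color : List (String × Int)) (remaining_basics : Int) (colors : List String) : List (String × Int) :=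
  if colors = [] then basics_per_color
  else
    let final_distribution := PySem.Dict.mk basics_per_color
    if remaining_basics ≤ 0 then final_distribution.items
    else
      let valid := colors.filter (fun c => final_distribution.contains c)
      let m : Int := (valid.length : Int)
      if valid.length = 0 then final_distribution.items
      else
        let q := PySem.Int.floordiv remaining_basics m
        let r := PySem.Int.mod remaining_basics m
        let f1 := (PySem.List.slice valid none (some r)).foldl (fun d c => d.modify c 0 (· + (q + 1))) final_distribution
        let f2 := (PySem.List.slice valid (some r) none).foldl (fun d c => d.modify c 0 (· + q)) f1
        f2.items

-- ===== PRECONDITION & SPEC =====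
-- Pre_ excludes (a) association lists with duplicate keys — they do not represent any Python dict
-- (A's parameter is a dict, whose keys are unique), and the two ports' Dict updates may collapse
-- such duplicates differently — and (b) the inputs on which A's while loop never terminates
-- (positive remainder, nonempty colors, none of which is a key), where A returns nothing at all.
def Pre_distribute_remaining_basics (basics_per_color : List (String × Int)) (remaining_basics : Int) (colors : List String) : Prop :=
  (basics_per_color.map Prod.fst).Nodup ∧
  (0 < remaining_basics → colors ≠ [] → ∃ c ∈ colors, c ∈ basics_per_color.map Prod.fst)
instance (basics_per_color : List (String × Int)) (remaining_basics : Int) (colors : List String) : Decidable (Pre_distribute_remaining_basics basics_per_color remaining_basics colors) := by unfold Pre_distribute_remaining_basics; infer_instance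

def pvWitness_distribute_remaining_basics : (List (String × Int)) × Int × List String :=
  ([("W", 6), ("U", 6), ("B", 6)], 2, ["W", "U", "B"])

def Spec_distribute_remaining_basics (basics_per_color : List (String × Int)) (remaining_basics : Int) (colors : List String) (out : List (String × Int)) : Prop := out = distribute_remaining_basics_alt basics_per_color remaining_basics colors
instance (basics_per_color : List (String × Int)) (remaining_basics : Int) (colors : List String) (out : List (String × Int)) : Decidable (Spec_distribute_remaining_basics basics_per_color remaining_basics colors out) := by unfold Spec_distribute_remaining_basics; infer_instance

-- ===== CLAIM (what is proved, stated in full; the proofs are below) =====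
def Claim_equal_distribute_remaining_basics : Prop := ∀ (basics_per_color : List (String × Int)) (remaining_basics : Int) (colors : List String), Dom_distribute_remaining_basics basics_per_color remaining_basics colors → Pre_distribute_remaining_basics basics_per_color remaining_basics colors → Spec_distribute_remaining_basics basics_per_color remaining_basics colors (distribute_remaining_basics basics_per_color remaining_basics colors)

-- ===== LEMMAS AND PROOFS =====

-- One pass of A's loop over a suffix of the colors list (proof-side reformulation).
def pvSeg (d : PySem.Dict String Int) (r : Int) (cs : List String) : PySem.Dict String Int × Int :=
  match cs with
  | [] => (d, r)
  | c :: cs' =>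
    if 0 < r then
      if d.contains c then pvSeg (d.modify c 0 (· + 1)) (r - 1) cs' else pvSeg d r cs'
    else (d, r)

-- Total number of +1's that key k receives from A's loop, in closed form.
def pvCountA (P : String → Bool) (colors : List String) (r : Int) (k : String) : Int :=
  let valid := colors.filter P
  let m : Int := (valid.length : Int)
  PySem.Int.floordiv r m * (valid.count k : Int) + ((valid.take (PySem.Int.mod r m).toNat).count k : Int)

lemma pvALoop_nonpos (fuel : Nat) (d : PySem.Dict String Int) (r : Int) (i : Nat) (colors : List String)
    (h : r ≤ 0) : pvALoop fuel d r i colors = d := by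
  cases fuel with
  | zero => rfl
  | succ n => simp [pvALoop]; omega

lemma pv_items_modify_add (d : PySem.Dict String Int) (c : String) (n : Int)
    (hc : d.contains c = true) (hnd : d.keys.Nodup) :
    (d.modify c 0 (· + n)).items = d.items.map (fun kv => if kv.1 = c then (kv.1, kv.2 + n) else kv) := by
  unfold PySem.Dict.modify
  rw [PySem.Dict.items_insert_of_contains d _ hc]
  apply List.map_congr_left
  intro p hp
  by_cases h : p.1 = c
  · have hp' : (c, p.2) ∈ d.items := by
      have : p = (c, p.2) := by cases p; simp_all
      rwa [this] at hp
    have hg : d.getD c 0 = p.2 := PySem.Dict.getD_of_mem_items d hp' hnd 0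
    simp [h, hg]
  · simp [h]

lemma pv_contains_modify_stable (d : PySem.Dict String Int) (c : String) (n : Int)
    (hc : d.contains c = true) : ∀ c', (d.modify c 0 (· + n)).contains c' = d.contains c' := by
  intro c'
  rw [PySem.Dict.contains_modify]
  by_cases h : c' = c <;> simp [h, hc]

lemma pv_keys_modify_stable (d : PySem.Dict String Int) (c : String) (n : Int)
    (hc : d.contains c = true) (hnd : d.keys.Nodup) :
    (d.modify c 0 (· + n)).keys = d.keys := by
  show (d.modify c 0 (· + n)).items.map Prod.fst = d.items.map Prod.fst
  rw [pv_items_modify_add d c n hc hnd, List.map_map]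
  apply List.map_congr_left
  intro q _; by_cases h : q.1 = c <;> simp [h]

-- foldl of `d[k] += n` updates, all keys present: pointwise addition of the per-key sums
lemma pv_items_foldl_ops (pairs : List (String × Int)) :
    ∀ (d : PySem.Dict String Int),
    (∀ p ∈ pairs, d.contains p.1 = true) → d.keys.Nodup →
    (pairs.foldl (fun d p => d.modify p.1 0 (· + p.2)) d).items
      = d.items.map (fun kv => (kv.1, kv.2 + ((pairs.filter (fun p => p.1 == kv.1)).map Prod.snd).sum)) := by
  induction pairs with
  | nil => intro d _ _; simp
  | cons p ps ih =>
    intro d hmem hnd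
    have hc : d.contains p.1 = true := hmem p (by simp)
    have hstep := pv_items_modify_add d p.1 p.2 hc hnd
    have hnd' : (d.modify p.1 0 (· + p.2)).keys.Nodup := by
      rw [pv_keys_modify_stable d p.1 p.2 hc hnd]; exact hnd
    have hmem' : ∀ q ∈ ps, (d.modify p.1 0 (· + p.2)).contains q.1 = true := by
      intro q hq
      rw [PySem.Dict.contains_modify]
      simp [hmem q (List.mem_cons_of_mem _ hq)]
    rw [List.foldl_cons, ih _ hmem' hnd', hstep, List.map_map]
    apply List.map_congr_left
    intro q _
    by_cases h : q.1 = p.1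
    · simp [h]; ring
    · simp [h, Ne.symm h]

lemma pvSeg_contains (cs : List String) : ∀ (d : PySem.Dict String Int) (r : Int),
    d.keys.Nodup → ∀ c, ((pvSeg d r cs).1).contains c = d.contains c := by
  induction cs with
  | nil => intro d r _ c; simp [pvSeg]
  | cons x cs ih =>
    intro d r hnd c
    by_cases hr : 0 < r
    · by_cases hx : d.contains x = true
      · have hnd' := (pv_keys_modify_stable d x 1 hx hnd) ▸ hnd
        simp only [pvSeg, if_pos hr, if_pos hx]
        rw [ih _ _ hnd', pv_contains_modify_stable d x 1 hx]
      · simp only [pvSeg, if_pos hr, if_neg hx]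
        exact ih _ _ hnd c
    · simp [pvSeg, hr]

lemma pvSeg_snd (cs : List String) : ∀ (d : PySem.Dict String Int) (r : Int) (P : String → Bool),
    (∀ c, d.contains c = P c) → d.keys.Nodup → 0 ≤ r →
    (pvSeg d r cs).2 = r - min r (cs.countP P : Int) := by
  induction cs with
  | nil => intro d r P _ _ hr; simp [pvSeg]; omega
  | cons x cs ih =>
    intro d r P hP hnd hr
    by_cases hrp : 0 < r
    · by_cases hx : d.contains x = true
      · have hnd' := (pv_keys_modify_stable d x 1 hx hnd) ▸ hnd
        have hP' : ∀ c, (d.modify x 0 (· + 1)).contains c = P c := by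
          intro c; rw [pv_contains_modify_stable d x 1 hx]; exact hP c
        simp only [pvSeg, if_pos hrp, if_pos hx]
        rw [ih _ _ P hP' hnd' (by omega)]
        have : (x :: cs).countP P = cs.countP P + 1 := by
          rw [List.countP_cons]; simp [← hP x, hx]
        rw [this]; push_cast; omega
      · simp only [pvSeg, if_pos hrp, if_neg hx]
        rw [ih _ _ P hP hnd hr]
        have : (x :: cs).countP P = cs.countP P := by
          rw [List.countP_cons]; simp [← hP x]; simp at hx; simp [hx]
        rw [this]
    · have : r = 0 := by omega
      subst this; simp [pvSeg]

lemma pvSeg_items (cs : List String) : ∀ (d : PySem.Dict String Int) (r : Int) (P : String → Bool),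
    (∀ c, d.contains c = P c) → d.keys.Nodup → 0 ≤ r →
    ((pvSeg d r cs).1).items
      = d.items.map (fun kv => (kv.1, kv.2 + (((cs.filter P).take r.toNat).count kv.1 : Int))) := by
  induction cs with
  | nil => intro d r P _ _ _; simp [pvSeg]
  | cons x cs ih =>
    intro d r P hP hnd hr
    by_cases hrp : 0 < r
    · by_cases hx : d.contains x = true
      · have hnd' := (pv_keys_modify_stable d x 1 hx hnd) ▸ hnd
        have hP' : ∀ c, (d.modify x 0 (· + 1)).contains c = P c := by
          intro c; rw [pv_contains_modify_stable d x 1 hx]; exact hP c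
        have hPx : P x = true := by rw [← hP x]; exact hx
        simp only [pvSeg, if_pos hrp, if_pos hx]
        rw [ih _ _ P hP' hnd' (by omega), pv_items_modify_add d x 1 hx hnd, List.map_map]
        have htake : (x :: cs).filter P = x :: cs.filter P := by simp [List.filter_cons, hPx]
        rw [htake]
        have ht2 : (x :: cs.filter P).take r.toNat = x :: (cs.filter P).take (r - 1).toNat := by
          have : r.toNat = (r - 1).toNat + 1 := by omega
          rw [this, List.take_succ_cons]
        rw [ht2]
        apply List.map_congr_left
        intro q _
        by_cases h : q.1 = x
        · simp [h, List.count_cons]; push_cast; ring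
        · simp [h, List.count_cons, Ne.symm h]
      · have hPx : P x = false := by rw [← hP x]; simpa using hx
        simp only [pvSeg, if_pos hrp, if_neg hx]
        rw [ih _ _ P hP hnd hr]
        simp [List.filter_cons, hPx]
    · have : r = 0 := by omega
      subst this; simp [pvSeg]

-- A's loop over one segment equals pvSeg followed by the loop restarted at index 0.
lemma pv_seg_loop (colors : List String) (fuel : Nat) : ∀ (cs : List String) (c : String)
    (d : PySem.Dict String Int) (r : Int),
    colors.drop (colors.length - (c :: cs).length) = c :: cs → (c :: cs).length ≤ colors.length →
    pvALoop ((c :: cs).length + fuel) d r (colors.length - (c :: cs).length) colors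
      = (if 0 < (pvSeg d r (c :: cs)).2
         then pvALoop fuel (pvSeg d r (c :: cs)).1 (pvSeg d r (c :: cs)).2 0 colors
         else (pvSeg d r (c :: cs)).1) := by
  intro cs
  induction cs with
  | nil =>
    intro c d r hdrop hlen
    simp only [List.length_cons, List.length_nil] at hdrop hlen ⊢
    by_cases hr : 0 < r
    · have hi : colors.length - 1 < colors.length := by omega
      have hget : colors.getD (colors.length - 1) "" = c := by
        have h0 : colors[colors.length - 1]? = some c := by
          have h1 : colors[colors.length - 1 + 0]? = some c := by
            rw [← List.getElem?_drop, hdrop]; rfl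
          simpa using h1
        simp [List.getD_eq_getElem?_getD, h0]
      have hmod : (colors.length - 1 + 1) % colors.length = 0 := by
        have : colors.length - 1 + 1 = colors.length := by omega
        rw [this, Nat.mod_self]
      show pvALoop (1 + fuel) d r (colors.length - 1) colors = _
      have h1f : 1 + fuel = fuel + 1 := by omega
      rw [h1f]
      simp only [pvALoop, if_pos (And.intro hr hi), hget, hmod]
      by_cases hc : d.contains c = true
      · simp only [pvSeg, if_pos hr, if_pos hc, pvSeg]
        by_cases hr1 : 0 < r - 1
        · rw [if_pos hr1]
        · rw [if_neg hr1]; exact pvALoop_nonpos _ _ _ _ _ (by omega)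
      · simp only [pvSeg, if_pos hr, if_neg hc, pvSeg, if_pos hr]
    · rw [pvALoop_nonpos _ _ _ _ _ (by omega)]
      simp [pvSeg, hr]
  | cons c' cs ih =>
    intro c d r hdrop hlen
    simp only [List.length_cons] at hdrop hlen ⊢
    by_cases hr : 0 < r
    · have hi : colors.length - (cs.length + 1 + 1) < colors.length := by omega
      have hget : colors.getD (colors.length - (cs.length + 1 + 1)) "" = c := by
        have h0 : colors[colors.length - (cs.length + 1 + 1)]? = some c := by
          have h1 : colors[colors.length - (cs.length + 1 + 1) + 0]? = some c := by
            rw [← List.getElem?_drop, hdrop]; rfl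
          simpa using h1
        simp [List.getD_eq_getElem?_getD, h0]
      have hmod : (colors.length - (cs.length + 1 + 1) + 1) % colors.length
          = colors.length - (cs.length + 1) := by
        have h1 : colors.length - (cs.length + 1 + 1) + 1 = colors.length - (cs.length + 1) := by omega
        rw [h1, Nat.mod_eq_of_lt (by omega)]
      have hdrop' : colors.drop (colors.length - (cs.length + 1)) = c' :: cs := by
        have h2 : colors.length - (cs.length + 1) = (colors.length - (cs.length + 1 + 1)) + 1 := by omega
        rw [h2, ← List.tail_drop, hdrop, List.tail_cons]
      show pvALoop (cs.length + 1 + 1 + fuel) d r (colors.length - (cs.length + 1 + 1)) colors = _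
      have h1f : cs.length + 1 + 1 + fuel = (cs.length + 1 + fuel) + 1 := by omega
      rw [h1f]
      simp only [pvALoop, if_pos (And.intro hr hi), hget, hmod]
      by_cases hc : d.contains c = true
      · rw [if_pos hc]
        have := ih c' (d.modify c 0 (· + 1)) (r - 1) (by simpa using hdrop') (by simp; omega)
        simp only [List.length_cons] at this
        rw [this]
        simp only [pvSeg, if_pos hr, if_pos hc]
      · rw [if_neg hc]
        have := ih c' d r (by simpa using hdrop') (by simp; omega)
        simp only [List.length_cons] at this
        rw [this]
        simp only [pvSeg, if_pos hr, if_neg hc]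
    · rw [pvALoop_nonpos _ _ _ _ _ (by omega)]
      simp [pvSeg, hr]

lemma pv_pass_loop (colors : List String) (hne : colors ≠ []) (fuel : Nat)
    (d : PySem.Dict String Int) (r : Int) :
    pvALoop (colors.length + fuel) d r 0 colors
      = (if 0 < (pvSeg d r colors).2
         then pvALoop fuel (pvSeg d r colors).1 (pvSeg d r colors).2 0 colors
         else (pvSeg d r colors).1) := by
  obtain ⟨c, cs, rfl⟩ := List.exists_cons_of_ne_nil hne
  have := pv_seg_loop (c :: cs) fuel cs c d r (by simp) (by simp)
  simpa using this

lemma pv_keys_eq_of_items_map (d d' : PySem.Dict String Int)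
    (f : String × Int → Int) (h : d'.items = d.items.map (fun kv => (kv.1, f kv))) :
    d'.keys = d.keys := by
  show d'.items.map Prod.fst = d.items.map Prod.fst
  rw [h, List.map_map]; rfl

lemma pv_mainA (colors : List String) (P : String → Bool)
    (hm : 0 < (colors.filter P).length) :
    ∀ (N : Nat) (r : Int) (d : PySem.Dict String Int) (fuel : Nat), r.toNat ≤ N → 0 < r →
    (∀ c, d.contains c = P c) → d.keys.Nodup → r.toNat * colors.length ≤ fuel →
    (pvALoop fuel d r 0 colors).items
      = d.items.map (fun kv => (kv.1, kv.2 + pvCountA P colors r kv.1)) := by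
  have hne : colors ≠ [] := by
    intro h; rw [h] at hm; simp at hm
  intro N
  induction N with
  | zero => intro r d fuel hN hr; omega
  | succ N ih =>
    intro r d fuel hN hr hP hnd hfuel
    have hlen : 0 < colors.length := List.length_pos_of_ne_nil hne
    obtain ⟨f', rfl⟩ : ∃ f', fuel = colors.length + f' := by
      refine ⟨fuel - colors.length, ?_⟩
      have : colors.length ≤ fuel := le_trans (by nlinarith [Int.toNat_of_nonneg (le_of_lt hr)]) hfuel
      omega
    rw [pv_pass_loop colors hne f' d r]
    have hcount : (colors.countP P : Int) = ((colors.filter P).length : Int) := by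
      rw [List.countP_eq_length_filter]
    set m : Int := ((colors.filter P).length : Int) with hmdef
    have hm' : 0 < m := by rw [hmdef]; exact_mod_cast hm
    have hsnd := pvSeg_snd colors d r P hP hnd (le_of_lt hr)
    rw [hcount] at hsnd
    have hitems := pvSeg_items colors d r P hP hnd (le_of_lt hr)
    have hkeys : ((pvSeg d r colors).1).keys = d.keys := pv_keys_eq_of_items_map _ _ _ hitems
    by_cases hcase : r ≤ m
    · have hz : (pvSeg d r colors).2 = 0 := by rw [hsnd]; omega
      rw [hz, if_neg (by omega), hitems]
      apply List.map_congr_left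
      intro kv _
      congr 1
      unfold pvCountA
      simp only [← hmdef]
      by_cases heq : r = m
      · have hq : PySem.Int.floordiv r m = 1 := by
          rw [PySem.Int.floordiv_eq_ediv_of_pos hm', heq, Int.ediv_self (by omega)]
        have hrr : PySem.Int.mod r m = 0 := by
          rw [PySem.Int.mod_eq_emod_of_pos hm', heq, Int.emod_self]
        simp only [hq, hrr]
        have htake : (colors.filter P).take r.toNat = colors.filter P := by
          apply List.take_of_length_le; omega
        rw [htake]
        simp
      · have hlt : r < m := by omega
        have hq : PySem.Int.floordiv r m = 0 := by
          rw [PySem.Int.floordiv_eq_ediv_of_pos hm']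
          exact Int.ediv_eq_zero_of_lt (by omega) hlt
        have hrr : PySem.Int.mod r m = r := by
          rw [PySem.Int.mod_eq_emod_of_pos hm']
          exact Int.emod_eq_of_lt (by omega) hlt
        simp [hq, hrr]
    · have hr' : 0 < r - m := by omega
      have hz : (pvSeg d r colors).2 = r - m := by rw [hsnd]; omega
      rw [hz, if_pos hr']
      have hP' : ∀ c, ((pvSeg d r colors).1).contains c = P c := by
        intro c; rw [pvSeg_contains colors d r hnd c]; exact hP c
      have hnd' : ((pvSeg d r colors).1).keys.Nodup := by rw [hkeys]; exact hnd
      have htoN : (r - m).toNat ≤ N := by omega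
      have hfuel' : (r - m).toNat * colors.length ≤ f' := by
        have h1 : (r - m).toNat + 1 ≤ r.toNat := by omega
        nlinarith
      rw [ih (r - m) _ f' htoN hr' hP' hnd' hfuel', hitems, List.map_map]
      have htake : (colors.filter P).take r.toNat = colors.filter P := by
        apply List.take_of_length_le; omega
      rw [htake]
      apply List.map_congr_left
      intro kv _
      simp only [Function.comp]
      congr 1
      unfold pvCountA
      simp only [← hmdef]
      have hq : PySem.Int.floordiv r m = PySem.Int.floordiv (r - m) m + 1 := by
        rw [PySem.Int.floordiv_eq_ediv_of_pos hm', PySem.Int.floordiv_eq_ediv_of_pos hm']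
        conv_lhs => rw [show r = (r - m) + 1 * m by ring]
        rw [Int.add_mul_ediv_right _ _ (by omega)]
      have hrr : PySem.Int.mod r m = PySem.Int.mod (r - m) m := by
        rw [PySem.Int.mod_eq_emod_of_pos hm', PySem.Int.mod_eq_emod_of_pos hm']
        conv_lhs => rw [show r = (r - m) + 1 * m by ring]
        rw [Int.add_mul_emod_self_right]
      rw [hq, hrr]
      ring

lemma pv_sum_pairs (l : List String) (n : Int) (k : String) :
    (((l.map (fun c => (c, n))).filter (fun p => p.1 == k)).map Prod.snd).sum
      = n * (l.count k : Int) := by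
  induction l with
  | nil => simp
  | cons x l ih =>
    by_cases h : x = k
    · simp [h, ih]; push_cast; ring
    · simp [List.filter_cons, h, List.count_cons, ih]

lemma pv_final : ∀ (basics_per_color : List (String × Int)) (remaining_basics : Int) (colors : List String),
    Pre_distribute_remaining_basics basics_per_color remaining_basics colors →
    distribute_remaining_basics basics_per_color remaining_basics colors
      = distribute_remaining_basics_alt basics_per_color remaining_basics colors := by
  intro bpc r colors hpre
  obtain ⟨hnd0, hex⟩ := hpre
  unfold distribute_remaining_basics distribute_remaining_basics_alt
  by_cases hc : colors = []
  · simp [hc]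
  · rw [if_neg hc, if_neg hc]
    dsimp only
    set d := PySem.Dict.mk bpc with hd
    have hitems0 : d.items = bpc := rfl
    have hnd : d.keys.Nodup := by
      show (d.items.map Prod.fst).Nodup
      rw [hitems0]; exact hnd0
    by_cases hr : r ≤ 0
    · rw [if_pos hr, pvALoop_nonpos _ _ _ _ _ hr]
    · rw [if_neg hr]
      push_neg at hr
      set P : String → Bool := fun c => d.contains c with hP
      set valid := colors.filter P with hvalid
      have hmemkeys : ∀ c, P c = true ↔ c ∈ bpc.map Prod.fst := by
        intro c
        rw [hP]
        show d.contains c = true ↔ _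
        rw [hd, PySem.Dict.contains_mk]
        simp [List.any_eq_true, List.mem_map]
      have hvne : valid ≠ [] := by
        obtain ⟨c, hc1, hc2⟩ := hex hr hc
        intro hempty
        have : c ∈ valid := List.mem_filter.mpr ⟨hc1, (hmemkeys c).mpr hc2⟩
        rw [hempty] at this; simp at this
      have hm : 0 < valid.length := List.length_pos_of_ne_nil hvne
      rw [if_neg (by omega)]
      have hA := pv_mainA colors P (by rw [← hvalid]; exact hm) r.toNat r d
        (r.toNat * colors.length + colors.length + 1) (le_refl _) hr (fun _ => rfl) hnd (by omega)
      rw [hA]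
      set mI : Int := (valid.length : Int) with hmI
      have hmI' : 0 < mI := by rw [hmI]; exact_mod_cast hm
      set q := PySem.Int.floordiv r mI with hq
      set rr := PySem.Int.mod r mI with hrr
      have hrr0 : 0 ≤ rr := PySem.Int.mod_nonneg r hmI'
      rw [PySem.List.slice_to valid hrr0, PySem.List.slice_from valid hrr0]
      rw [show (fun (d : PySem.Dict String Int) (c : String) => d.modify c 0 (· + (q + 1))) = (fun (d : PySem.Dict String Int) (c : String) => (fun d p => PySem.Dict.modify d p.1 0 (· + p.2)) d ((fun c => (c, q + 1)) c)) from rfl]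
      rw [show (fun (d : PySem.Dict String Int) (c : String) => d.modify c 0 (· + q)) = (fun (d : PySem.Dict String Int) (c : String) => (fun d p => PySem.Dict.modify d p.1 0 (· + p.2)) d ((fun c => (c, q)) c)) from rfl]
      set op : PySem.Dict String Int → String × Int → PySem.Dict String Int := fun d p => d.modify p.1 0 (· + p.2) with hop
      have e1 : List.foldl (fun d c => op d ((fun c => (c, q + 1)) c)) d (valid.take rr.toNat)
          = List.foldl op d ((valid.take rr.toNat).map (fun c => (c, q + 1))) := by
        rw [List.foldl_map]
      have e2 : List.foldl (fun d c => op d ((fun c => (c, q)) c))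
            (List.foldl op d ((valid.take rr.toNat).map (fun c => (c, q + 1)))) (valid.drop rr.toNat)
          = List.foldl op (List.foldl op d ((valid.take rr.toNat).map (fun c => (c, q + 1))))
            ((valid.drop rr.toNat).map (fun c => (c, q))) := by
        simp only [List.foldl_map]
      rw [e1, e2, ← List.foldl_append, hop]
      have hmem : ∀ p ∈ (valid.take rr.toNat).map (fun c => (c, q + 1))
          ++ (valid.drop rr.toNat).map (fun c => (c, q)), d.contains p.1 = true := by
        intro p hp
        have hpv : p.1 ∈ valid := by
          rcases List.mem_append.mp hp with h | h
          · obtain ⟨c, hc1, rfl⟩ := List.mem_map.mp h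
            exact List.mem_of_mem_take hc1
          · obtain ⟨c, hc1, rfl⟩ := List.mem_map.mp h
            exact List.mem_of_mem_drop hc1
        exact (List.mem_filter.mp hpv).2
      rw [pv_items_foldl_ops _ d hmem hnd]
      apply List.map_congr_left
      intro kv _
      congr 1
      rw [List.filter_append, List.map_append, List.sum_append, pv_sum_pairs, pv_sum_pairs]
      unfold pvCountA
      simp only [← hvalid, ← hmI, ← hq, ← hrr]
      have hsplit : (valid.count kv.1 : Int)
          = ((valid.take rr.toNat).count kv.1 : Int) + ((valid.drop rr.toNat).count kv.1 : Int) := by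
        conv_lhs => rw [← List.take_append_drop rr.toNat valid]
        push_cast [List.count_append]; ring
      rw [hsplit]; ring

-- ===== VERDICT (by name: the statement is the Claim_ definition above) =====
theorem distribute_remaining_basics_spec : Claim_equal_distribute_remaining_basics := by
  intro bpc r colors _ hpre
  unfold Spec_distribute_remaining_basics
  exact pv_final bpc r colors hpre
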